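-- pv_equiv track=rewrite | github.com/Eks2/AdventOfCode2017 | day6/problem.py | redistribute_int_list_at_index
-- ===== SOURCE A (Python) =====
-- def redistribute_int_list_at_index(int_list, index):
--     value = int_list[index]
--     int_list[index] = 0
--     while value > 0:
--         index += 1
--         index %= len(int_list)
--         int_list[index] = int_list[index] + 1
--         value -= 1
--     return int_list
-- ===== SOURCE B (Python) =====
-- def redistribute_int_list_at_index(int_list, index):
--     n = len(int_list)
--     start = index % n
--     value = int_list[start]
--     q, r = divmod(value, n) if value > 0 else (0, 0)
--     for j in range(n):
--         int_list[j] = (0 if j == start else int_list[j]) + q + (1 if 0 < (j - start) % n <= r else 0)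
--     return int_list
-- ===== Notes on version B (the rewrite author's own statement) =====
-- stated objective: alternative
-- what changed: Replaces the one-block-at-a-time while loop (one iteration per block of value) with a closed-form arithmetic distribution: q,r = divmod(value, n), every slot gets +q and the r slots after the start get +1, computed in a single pass over the list.
import Mathlib
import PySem

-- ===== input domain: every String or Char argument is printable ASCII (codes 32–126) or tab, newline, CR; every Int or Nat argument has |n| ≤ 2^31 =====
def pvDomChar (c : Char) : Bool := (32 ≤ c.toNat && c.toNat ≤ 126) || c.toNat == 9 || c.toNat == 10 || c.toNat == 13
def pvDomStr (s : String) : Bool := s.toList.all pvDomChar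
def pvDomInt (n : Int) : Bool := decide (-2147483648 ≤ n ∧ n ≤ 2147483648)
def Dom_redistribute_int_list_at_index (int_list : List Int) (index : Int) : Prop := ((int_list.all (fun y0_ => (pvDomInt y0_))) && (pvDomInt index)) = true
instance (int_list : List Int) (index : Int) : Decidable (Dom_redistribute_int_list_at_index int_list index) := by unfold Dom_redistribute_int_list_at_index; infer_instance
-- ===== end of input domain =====

-- B replaces A's one-block-at-a-time while loop (one iteration per block) with a closed-form
-- divmod distribution computed in one pass over the list (objective: alternative).
-- A mutates its argument in place; the equivalence proved here is about the RETURN value only.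

-- ===== PORT A =====
-- while value > 0: index += 1; index %= len; int_list[index] += 1; value -= 1
def redisA_loop (lst : List Int) (index : Int) (value : Int) : List Int :=
  if 0 < value then
    let index' := PySem.Int.mod (index + 1) (lst.length : Int)
    redisA_loop (PySem.List.pySetD lst index' (PySem.List.pyGetD lst index' 0 + 1)) index' (value - 1)
  else lst
termination_by value.toNat
decreasing_by omega

def redistribute_int_list_at_index (int_list : List Int) (index : Int) : List Int :=
  let value := PySem.List.pyGetD int_list index 0        -- int_list[index]; in range under Pre_
  let lst := PySem.List.pySetD int_list index 0          -- int_list[index] = 0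
  redisA_loop lst index value

-- ===== PORT B =====
def redistribute_int_list_at_index_alt (int_list : List Int) (index : Int) : List Int :=
  let n : Int := int_list.length
  let start := PySem.Int.mod index n
  let value := PySem.List.pyGetD int_list start 0
  let q := if 0 < value then PySem.Int.floordiv value n else 0
  let r := if 0 < value then PySem.Int.mod value n else 0
  (List.range int_list.length).map (fun (j : Nat) =>
    (if (j : Int) = start then 0 else PySem.List.pyGetD int_list (j : Int) 0) + q +
    (if 0 < PySem.Int.mod ((j : Int) - start) n ∧ PySem.Int.mod ((j : Int) - start) n ≤ r then 1 else 0))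

-- ===== PRECONDITION & SPEC =====
-- A raises IndexError when int_list is empty or index is out of range; exactly those inputs are excluded.
def Pre_redistribute_int_list_at_index (int_list : List Int) (index : Int) : Prop :=
  PySem.Raise.InRange int_list.length index
instance (int_list : List Int) (index : Int) : Decidable (Pre_redistribute_int_list_at_index int_list index) := by unfold Pre_redistribute_int_list_at_index; infer_instance

def pvWitness_redistribute_int_list_at_index : List Int × Int := ([0, 2, 7, 0], 2)

def Spec_redistribute_int_list_at_index (int_list : List Int) (index : Int) (out : List Int) : Prop := out = redistribute_int_list_at_index_alt int_list index
instance (int_list : List Int) (index : Int) (out : List Int) : Decidable (Spec_redistribute_int_list_at_index int_list index out) := by unfold Spec_redistribute_int_list_at_index; infer_instance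

-- ===== CLAIM (what is proved, stated in full; the proofs are below) =====
def Claim_equal_redistribute_int_list_at_index : Prop := ∀ (int_list : List Int) (index : Int), Dom_redistribute_int_list_at_index int_list index → Pre_redistribute_int_list_at_index int_list index → Spec_redistribute_int_list_at_index int_list index (redistribute_int_list_at_index int_list index)

-- ===== LEMMAS AND PROOFS =====

-- closed form the loop computes: every slot gets +(v/n), slots index+1 .. index+(v%n) (mod n) get +1
def bcore (lst : List Int) (index : Int) (v : Int) : List Int :=
  let n : Int := lst.length
  let q := if 0 < v then PySem.Int.floordiv v n else 0
  let r := if 0 < v then PySem.Int.mod v n else 0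
  (List.range lst.length).map (fun (j : Nat) =>
    PySem.List.pyGetD lst (j : Int) 0 + q +
    (if 0 < PySem.Int.mod ((j : Int) - index) n ∧ PySem.Int.mod ((j : Int) - index) n ≤ r then 1 else 0))

-- (a - 1) % n in terms of a % n
lemma emod_pred (n a : Int) (hn : 0 < n) :
    (a - 1) % n = if a % n = 0 then n - 1 else a % n - 1 := by
  have h := Int.mul_ediv_add_emod a n
  have h0 : 0 ≤ a % n := Int.emod_nonneg a (by omega)
  have h1 : a % n < n := Int.emod_lt_of_pos a hn
  by_cases hz : a % n = 0
  · simp only [hz, if_pos]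
    have e : n * (a / n - 1) = n * (a / n) - n := by ring
    have : a - 1 = (n - 1) + n * (a / n - 1) := by omega
    rw [this, Int.add_mul_emod_self_left, Int.emod_eq_of_lt (by omega) (by omega)]
  · simp only [hz, ite_false]
    have : a - 1 = (a % n - 1) + n * (a / n) := by omega
    rw [this, Int.add_mul_emod_self_left, Int.emod_eq_of_lt (by omega) (by omega)]

-- key arithmetic step of the redistribution
lemma key (n v index j : Int) (hn : 0 < n) (hv : 0 < v) (hj : 0 ≤ j) (hjn : j < n) :
    ((if j = (index + 1) % n then (1 : Int) else 0) + (v - 1) / n +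
      (if 0 < (j - ((index + 1) % n)) % n ∧ (j - ((index + 1) % n)) % n ≤ (v - 1) % n then (1:Int) else 0))
    = v / n + (if 0 < (j - index) % n ∧ (j - index) % n ≤ v % n then (1:Int) else 0) := by
  have hd0 : 0 ≤ (j - index) % n := Int.emod_nonneg _ (by omega)
  have hd1 : (j - index) % n < n := Int.emod_lt_of_pos _ hn
  have hi0 : 0 ≤ (index + 1) % n := Int.emod_nonneg _ (by omega)
  have hi1 : (index + 1) % n < n := Int.emod_lt_of_pos _ hn
  have hr0 : 0 ≤ v % n := Int.emod_nonneg _ (by omega)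
  have hr1 : v % n < n := Int.emod_lt_of_pos _ hn
  have hq := Int.mul_ediv_add_emod v n
  have hq' := Int.mul_ediv_add_emod (v - 1) n
  have hdp : (j - (index + 1) % n) % n = (j - index - 1) % n := by
    rw [Int.sub_emod j ((index + 1) % n) n, Int.emod_emod_of_dvd (index + 1) (dvd_refl n),
      ← Int.sub_emod, show j - (index + 1) = j - index - 1 by ring]
  have hd' := emod_pred n (j - index) hn
  have hiff : (j = (index + 1) % n) ↔ (j - index - 1) % n = 0 := by
    constructor
    · intro h
      rw [← hdp, h, sub_self, Int.zero_emod]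
    · intro h
      have h2 : j % n = (index + 1) % n := by
        rw [Int.emod_eq_emod_iff_emod_sub_eq_zero, show j - (index + 1) = j - index - 1 by ring, h]
      rwa [Int.emod_eq_of_lt hj hjn] at h2
  have hr' := emod_pred n v hn
  rw [hdp]
  simp only [hiff]
  by_cases hz : v % n = 0
  · have hr'0 : (v - 1) % n = n - 1 := by rw [hr', if_pos hz]
    have hQ : (v - 1) / n = v / n - 1 := by
      have e1 : n * (v / n - 1) = n * (v / n) - n := by ring
      have hx : n * ((v - 1) / n) = n * (v / n - 1) := by omega
      exact Int.eq_of_mul_eq_mul_left (by omega) hx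
    rw [hr'0, hQ, hd']
    split_ifs <;> omega
  · have hr'1 : (v - 1) % n = v % n - 1 := by rw [hr', if_neg hz]
    have hQ : (v - 1) / n = v / n := by
      have hx : n * ((v - 1) / n) = n * (v / n) := by omega
      exact Int.eq_of_mul_eq_mul_left (by omega) hx
    rw [hr'1, hQ, hd']
    split_ifs <;> omega

lemma bcore_nonpos (lst : List Int) (index v : Int) (hv : ¬ 0 < v) : bcore lst index v = lst := by
  unfold bcore
  simp only [if_neg hv]
  apply List.ext_getElem
  · simp
  · intro i h1 h2
    simp only [List.getElem_map, List.getElem_range]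
    rw [PySem.List.pyGetD_eq_getElem _ _ (by omega) (by exact_mod_cast h2), if_neg]
    · simp
    · rintro ⟨ha, hb⟩; omega

lemma bcore_step (lst : List Int) (index v : Int) (hne : lst ≠ []) (hv : 0 < v) :
    bcore (PySem.List.pySetD lst (PySem.Int.mod (index + 1) (lst.length : Int))
        (PySem.List.pyGetD lst (PySem.Int.mod (index + 1) (lst.length : Int)) 0 + 1))
      (PySem.Int.mod (index + 1) (lst.length : Int)) (v - 1)
    = bcore lst index v := by
  have hn : 0 < (lst.length : Int) := by
    have := List.length_pos_iff.mpr hne; exact_mod_cast this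
  rw [PySem.Int.mod_eq_emod_of_pos hn]
  have hi0 : 0 ≤ (index + 1) % (lst.length : Int) := Int.emod_nonneg _ (by omega)
  have hi1 : (index + 1) % (lst.length : Int) < (lst.length : Int) := Int.emod_lt_of_pos _ hn
  have hget : PySem.List.pyGetD lst ((index + 1) % (lst.length : Int)) 0
      = lst[((index + 1) % (lst.length : Int)).toNat]'(by omega) :=
    PySem.List.pyGetD_eq_getElem lst 0 hi0 hi1
  rw [PySem.List.pySetD_of_nonneg _ _ hi0]
  unfold bcore
  simp only [List.length_set]
  simp only [PySem.Int.mod_eq_emod_of_pos hn, PySem.Int.floordiv_eq_ediv_of_pos hn]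
  have g1 : (if 0 < v - 1 then (v - 1) / (lst.length : Int) else 0) = (v - 1) / (lst.length : Int) := by
    split_ifs with h
    · rfl
    · have hz : v - 1 = 0 := by omega
      rw [hz, Int.zero_ediv]
  have g2 : (if 0 < v - 1 then (v - 1) % (lst.length : Int) else 0) = (v - 1) % (lst.length : Int) := by
    split_ifs with h
    · rfl
    · have hz : v - 1 = 0 := by omega
      rw [hz, Int.zero_emod]
  rw [g1, g2, if_pos hv, if_pos hv]
  apply List.ext_getElem
  · simp
  · intro j hj1 hj2
    simp only [List.getElem_map, List.getElem_range]
    have hjl : j < lst.length := by simpa using hj2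
    have hkey := key (lst.length : Int) v index (j : Int) hn hv (by omega) (by exact_mod_cast hjl)
    have hA : PySem.List.pyGetD (lst.set ((index + 1) % (lst.length : Int)).toNat
        (PySem.List.pyGetD lst ((index + 1) % (lst.length : Int)) 0 + 1)) (j : Int) 0
        = lst.getD j 0 + (if (j : Int) = (index + 1) % (lst.length : Int) then 1 else 0) := by
      rw [PySem.List.pyGetD_natCast]
      rw [List.getD_eq_getElem _ _ (by simpa using hjl), List.getD_eq_getElem _ _ hjl,
        List.getElem_set]
      by_cases hc : ((index + 1) % (lst.length : Int)).toNat = j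
      · rw [if_pos hc, if_pos (by omega), hget]
        simp [hc]
      · rw [if_neg hc, if_neg (by intro h; exact hc (by omega)), add_zero]
    rw [hA, PySem.List.pyGetD_natCast, List.getD_eq_getElem _ _ hjl]
    linear_combination hkey

lemma loop_eq (m : Nat) : ∀ (lst : List Int) (index v : Int), lst ≠ [] → v ≤ m →
    redisA_loop lst index v = bcore lst index v := by
  induction m with
  | zero =>
    intro lst index v hne hv
    rw [redisA_loop, if_neg (by omega), bcore_nonpos _ _ _ (by omega)]
  | succ k ih =>
    intro lst index v hne hv
    by_cases hv0 : 0 < v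
    · rw [redisA_loop, if_pos hv0, ih _ _ _ ?_ (by omega), bcore_step lst index v hne hv0]
      · intro hc
        apply hne
        have h0 := congrArg List.length hc
        rw [PySem.List.length_pySetD] at h0
        exact List.length_eq_zero_iff.mp (by simpa using h0)
    · rw [redisA_loop, if_neg hv0, bcore_nonpos _ _ _ hv0]

lemma emod_sub_emod (n a j : Int) : (j - a % n) % n = (j - a) % n := by
  rw [Int.sub_emod j (a % n) n, Int.emod_emod_of_dvd a (dvd_refl n), ← Int.sub_emod]

lemma neg_emod (n i : Int) (hn : 0 < n) (h1 : -n ≤ i) (h2 : i < 0) : i % n = i + n := by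
  have e : (i + n + n * (-1)) % n = (i + n) % n := Int.add_mul_emod_self_left (i + n) n (-1)
  rw [show i + n + n * (-1) = i by ring] at e
  rw [e, Int.emod_eq_of_lt (by omega) (by omega)]

lemma pyGetD_emod (xs : List Int) (i d : Int) (h1 : -(xs.length : Int) ≤ i)
    (h2 : i < (xs.length : Int)) :
    PySem.List.pyGetD xs i d = PySem.List.pyGetD xs (i % (xs.length : Int)) d := by
  have hn : 0 < (xs.length : Int) := by omega
  by_cases h0 : 0 ≤ i
  · rw [Int.emod_eq_of_lt h0 h2]
  · rw [neg_emod _ _ hn h1 (by omega)]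
    conv_rhs => rw [PySem.List.pyGetD_eq_getElem xs d (by omega) (by omega)]
    simp only [PySem.List.pyGetD, PySem.List.pyGet?, PySem.List.pyIdx?,
      if_neg h0, if_pos h1, Option.bind_some]
    rw [show xs.length - (-i).toNat = (i + (xs.length : Int)).toNat by omega,
      List.getElem?_eq_getElem (show (i + (xs.length : Int)).toNat < xs.length by omega)]
    rfl

lemma pySetD_emod (xs : List Int) (i v : Int) (h1 : -(xs.length : Int) ≤ i)
    (h2 : i < (xs.length : Int)) :
    PySem.List.pySetD xs i v = PySem.List.pySetD xs (i % (xs.length : Int)) v := by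
  have hn : 0 < (xs.length : Int) := by omega
  by_cases h0 : 0 ≤ i
  · rw [Int.emod_eq_of_lt h0 h2]
  · rw [neg_emod _ _ hn h1 (by omega)]
    conv_rhs => rw [PySem.List.pySetD_of_nonneg _ _ (by omega)]
    simp only [PySem.List.pySetD, PySem.List.pySet?, PySem.List.pyIdx?,
      if_neg h0, if_pos h1, Option.map_some, Option.getD_some]
    rw [show xs.length - (-i).toNat = (i + (xs.length : Int)).toNat by omega]

-- ===== VERDICT (by name: the statement is the Claim_ definition above) =====
theorem redistribute_int_list_at_index_spec : Claim_equal_redistribute_int_list_at_index := by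
  intro lst index _ hpre
  obtain ⟨h1, h2⟩ : -(lst.length : Int) ≤ index ∧ index < (lst.length : Int) := hpre
  have hn : 0 < (lst.length : Int) := by omega
  have hne : lst ≠ [] := by
    intro h; rw [h] at hn; simp at hn
  unfold Spec_redistribute_int_list_at_index
  unfold redistribute_int_list_at_index redistribute_int_list_at_index_alt
  simp only [PySem.Int.mod_eq_emod_of_pos hn]
  have hne0 : PySem.List.pySetD lst index 0 ≠ [] := by
    intro hc
    apply hne
    have h0 := congrArg List.length hc
    rw [PySem.List.length_pySetD] at h0
    exact List.length_eq_zero_iff.mp (by simpa using h0)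
  rw [loop_eq (PySem.List.pyGetD lst index 0).toNat _ _ _ hne0 (Int.self_le_toNat _)]
  rw [pySetD_emod lst index 0 h1 h2, ← pyGetD_emod lst index 0 h1 h2]
  have hs0 : 0 ≤ index % (lst.length : Int) := Int.emod_nonneg _ (by omega)
  have hs1 : index % (lst.length : Int) < (lst.length : Int) := Int.emod_lt_of_pos _ hn
  rw [PySem.List.pySetD_of_nonneg _ _ hs0]
  unfold bcore
  simp only [List.length_set, PySem.Int.mod_eq_emod_of_pos hn,
    PySem.Int.floordiv_eq_ediv_of_pos hn]
  apply List.ext_getElem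
  · simp
  · intro j hj1 hj2
    simp only [List.getElem_map, List.getElem_range]
    have hjl : j < lst.length := by simpa using hj2
    have hB : PySem.List.pyGetD (lst.set (index % (lst.length : Int)).toNat 0) (j : Int) 0
        = (if (j : Int) = index % (lst.length : Int) then 0
           else PySem.List.pyGetD lst (j : Int) 0) := by
      rw [PySem.List.pyGetD_natCast,
        List.getD_eq_getElem _ _ (by simpa using hjl), List.getElem_set]
      by_cases hc : (index % (lst.length : Int)).toNat = j
      · rw [if_pos hc, if_pos (by omega)]
      · rw [if_neg hc, if_neg (by intro h; exact hc (by omega)), PySem.List.pyGetD_natCast,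
          List.getD_eq_getElem _ _ hjl]
    rw [hB, emod_sub_emod]
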